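-- pv_equiv track=rewrite | github.com/jonathan-hellwig/master_thesis | code/section_5/helpers/noisy_gradient_descent.py | get_split_indices
-- ===== SOURCE A (Python) =====
-- def get_split_indices(sizes):
--     indices = []
--     current_index = 0
--     for in_size, out_size in zip(sizes, sizes[1:]):
--         indices.append(current_index + in_size * out_size)
--         current_index += in_size * out_size
--         indices.append(current_index + out_size)
--         current_index += out_size
--     return indices
-- ===== SOURCE B (Python) =====
-- def get_split_indices(sizes):
--     # Divide and conquer over the layer pairs: solve each half independently,
--     # then shift the right half's indices by the left half's total parameter count.
--     pairs = list(zip(sizes, sizes[1:]))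
--
--     def solve(lo, hi):
--         # returns (indices for pairs[lo:hi], total parameter count of pairs[lo:hi])
--         if lo >= hi:
--             return [], 0
--         if hi - lo == 1:
--             a, b = pairs[lo]
--             w = a * b
--             return [w, w + b], w + b
--         mid = (lo + hi) // 2
--         left, lt = solve(lo, mid)
--         right, rt = solve(mid, hi)
--         return left + [lt + x for x in right], lt + rt
--
--     return solve(0, len(pairs))[0]
-- ===== Notes on version B (the rewrite author's own statement) =====
-- stated objective: alternative
-- what changed: B replaces A's single left-to-right loop with a running accumulator by a divide-and-conquer: it solves each half of the layer-pair list independently and merges by shifting the right half's indices by the left half's total parameter count.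
import Mathlib
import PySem

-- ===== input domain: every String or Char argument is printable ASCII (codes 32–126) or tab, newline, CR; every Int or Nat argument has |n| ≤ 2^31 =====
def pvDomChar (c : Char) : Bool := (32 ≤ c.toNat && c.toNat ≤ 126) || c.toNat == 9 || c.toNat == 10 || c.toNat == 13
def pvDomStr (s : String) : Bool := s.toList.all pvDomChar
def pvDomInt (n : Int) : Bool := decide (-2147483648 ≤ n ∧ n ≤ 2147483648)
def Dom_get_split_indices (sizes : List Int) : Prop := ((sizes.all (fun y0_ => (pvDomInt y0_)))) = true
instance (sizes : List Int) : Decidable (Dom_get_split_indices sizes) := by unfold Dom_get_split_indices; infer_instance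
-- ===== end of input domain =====

-- B computes the same indices by divide-and-conquer with offset merging instead of A's
-- left-to-right loop with a running accumulator (alternative algorithm; same values).

-- ===== PORT A =====
-- literal port of A: one fold over zip(sizes, sizes[1:]) maintaining (indices, current_index)
def get_split_indices (sizes : List Int) : List Int :=
  ((sizes.zip sizes.tail).foldl
    (fun (st : List Int × Int) (p : Int × Int) =>
      let indices1 := st.1 ++ [st.2 + p.1 * p.2]
      let cur1 := st.2 + p.1 * p.2
      let indices2 := indices1 ++ [cur1 + p.2]
      let cur2 := cur1 + p.2
      (indices2, cur2))
    ([], 0)).1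

-- ===== PORT B =====
-- B's recursive solver over the pair list: solve each half, shift the right half by
-- the left half's total parameter count (port of Source B's `solve`, recursion on the slice)
def pvSolve : List (Int × Int) → List Int × Int
  | [] => ([], 0)
  | [p] => ([p.1 * p.2, p.1 * p.2 + p.2], p.1 * p.2 + p.2)
  | p :: q :: ps =>
      let l := p :: q :: ps
      let L := pvSolve (l.take (l.length / 2))
      let R := pvSolve (l.drop (l.length / 2))
      (L.1 ++ R.1.map (fun x => L.2 + x), L.2 + R.2)
termination_by l => l.length
decreasing_by
  · simp; omega
  · simp; omega

def get_split_indices_alt (sizes : List Int) : List Int :=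
  (pvSolve (sizes.zip sizes.tail)).1

-- ===== PRECONDITION & SPEC =====
def Spec_get_split_indices (sizes : List Int) (out : List Int) : Prop := out = get_split_indices_alt sizes
instance (sizes : List Int) (out : List Int) : Decidable (Spec_get_split_indices sizes out) := by unfold Spec_get_split_indices; infer_instance

-- ===== CLAIM (what is proved, stated in full; the proofs are below) =====
def Claim_equal_get_split_indices : Prop := ∀ (sizes : List Int), Dom_get_split_indices sizes → Spec_get_split_indices sizes (get_split_indices sizes)

-- ===== LEMMAS AND PROOFS =====
-- proof-side helpers: the interleaved delta list and its running prefix sums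
def pvDeltas (ps : List (Int × Int)) : List Int := ps.flatMap (fun p => [p.1 * p.2, p.2])

def pvAccum (total : Int) : List Int → List Int
  | [] => []
  | d :: ds => (total + d) :: pvAccum (total + d) ds

theorem pv_fold_eq_accum (ps : List (Int × Int)) (acc : List Int) (cur : Int) :
    (ps.foldl
      (fun (st : List Int × Int) (p : Int × Int) =>
        let indices1 := st.1 ++ [st.2 + p.1 * p.2]
        let cur1 := st.2 + p.1 * p.2
        let indices2 := indices1 ++ [cur1 + p.2]
        let cur2 := cur1 + p.2
        (indices2, cur2))
      (acc, cur)).1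
    = acc ++ pvAccum cur (pvDeltas ps) := by
  induction ps generalizing acc cur with
  | nil => simp [pvAccum, pvDeltas]
  | cons p ps ih =>
    simp only [List.foldl_cons, pvDeltas, List.flatMap_cons]
    rw [ih]
    simp [pvAccum, pvDeltas, List.append_assoc]

theorem pvAccum_shift (t c : Int) (ds : List Int) :
    pvAccum (t + c) ds = (pvAccum c ds).map (fun x => t + x) := by
  induction ds generalizing c with
  | nil => rfl
  | cons d ds ih =>
    simp only [pvAccum, List.map_cons]
    rw [add_assoc, ih (c + d)]

theorem pvAccum_append (c : Int) (ds es : List Int) :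
    pvAccum c (ds ++ es) = pvAccum c ds ++ pvAccum (c + ds.sum) es := by
  induction ds generalizing c with
  | nil => simp [pvAccum]
  | cons d ds ih =>
    simp only [List.cons_append, pvAccum, List.sum_cons]
    rw [ih (c + d)]
    ring_nf

theorem pvDeltas_append (ps qs : List (Int × Int)) :
    pvDeltas (ps ++ qs) = pvDeltas ps ++ pvDeltas qs := by
  simp [pvDeltas]

theorem pvSolve_eq (ps : List (Int × Int)) :
    pvSolve ps = (pvAccum 0 (pvDeltas ps), (pvDeltas ps).sum) := by
  fun_induction pvSolve ps with
  | case1 => rfl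
  | case2 p => simp [pvDeltas, pvAccum]
  | case3 p q ps l L R ihL ihR =>
    simp only [l, L, R]
    rw [ihL, ihR]
    have hsplit := List.take_append_drop ((p :: q :: ps).length / 2) (p :: q :: ps)
    have hd : pvDeltas (p :: q :: ps)
        = pvDeltas ((p :: q :: ps).take ((p :: q :: ps).length / 2))
          ++ pvDeltas ((p :: q :: ps).drop ((p :: q :: ps).length / 2)) := by
      conv_lhs => rw [← hsplit]
      exact pvDeltas_append _ _
    have h0 : pvAccum (pvDeltas ((p :: q :: ps).take ((p :: q :: ps).length / 2))).sum
          (pvDeltas ((p :: q :: ps).drop ((p :: q :: ps).length / 2)))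
        = (pvAccum 0 (pvDeltas ((p :: q :: ps).drop ((p :: q :: ps).length / 2)))).map
            (fun x => (pvDeltas ((p :: q :: ps).take ((p :: q :: ps).length / 2))).sum + x) := by
      simpa using pvAccum_shift
        (pvDeltas ((p :: q :: ps).take ((p :: q :: ps).length / 2))).sum 0
        (pvDeltas ((p :: q :: ps).drop ((p :: q :: ps).length / 2)))
    rw [hd, pvAccum_append, List.sum_append]
    simp only [zero_add]
    rw [h0]

-- ===== VERDICT (by name: the statement is the Claim_ definition above) =====
theorem get_split_indices_spec : Claim_equal_get_split_indices := by
  intro sizes _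
  unfold Spec_get_split_indices get_split_indices get_split_indices_alt
  rw [pvSolve_eq]
  simpa using pv_fold_eq_accum (sizes.zip sizes.tail) [] 0
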